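-- pv_equiv track=rewrite | github.com/hanna-joo/CodingTest | python/01_python_basic/goorm/stack_queue_03.py | block_boom_3
-- ===== SOURCE A (Python) =====
-- def block_boom_3(cnt, block):
--     # 스택이 비었을 때 참조하게 되면 IndexError 발생하니 더미 문자 추가
--     stack = list()
--     stack.append(('', 0))
--
--     # 마지막 뿌요가 터져야 할 수도 있으니 block 맨 뒤에 더미 문자 추가
--     block += 'z'
--     for char in block:
--         if (stack[-1][0] != char) and (stack[-1][1] >= cnt):
--                 top = stack[-1][0]
--                 while top == stack[-1][0]:
--                     stack.pop()
--         if stack[-1][0] == char: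
--             stack.append((char, stack[-1][1] + 1))
--         else:
--             stack.append((char, 1))
--     # block에 추가한 더미 문자 제거
--     stack.pop()
--
--     if len(stack) > 1:
--         block = ''
--         for char, num in stack:
--             block += char
--         return block
--     else:
--         return 'CLEAR!'
-- ===== SOURCE B (Python) =====
-- def block_boom_3(cnt, block):
--     # Run-length encode block + trailing dummy 'z', then run a stack of [char, length] runs.
--     runs = []
--     for ch in block + 'z':
--         if runs and runs[-1][0] == ch:
--             runs[-1][1] += 1
--         else:
--             runs.append([ch, 1])
--
--     stack = []
--     for ch, n in runs:
--         if stack and stack[-1][0] != ch and stack[-1][1] >= cnt: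
--             stack.pop()
--         if stack and stack[-1][0] == ch:
--             stack[-1][1] += n
--         else:
--             stack.append([ch, n])
--
--     # undo the one dummy 'z' appended to block
--     ch, n = stack[-1]
--     if n == 1:
--         stack.pop()
--     else:
--         stack[-1][1] = n - 1
--
--     return ''.join(c * m for c, m in stack) if stack else 'CLEAR!'
-- ===== Notes on version B (the rewrite author's own statement) =====
-- stated objective: alternative
-- what changed: A walks the string character by character keeping one stack entry per character (with its running count); B first run-length-encodes block+'z' into (char,length) runs and then runs a stack of whole runs, popping/merging one run at a time and finally decrementing the top run by one, with no dummy sentinel entry.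
import Mathlib
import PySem

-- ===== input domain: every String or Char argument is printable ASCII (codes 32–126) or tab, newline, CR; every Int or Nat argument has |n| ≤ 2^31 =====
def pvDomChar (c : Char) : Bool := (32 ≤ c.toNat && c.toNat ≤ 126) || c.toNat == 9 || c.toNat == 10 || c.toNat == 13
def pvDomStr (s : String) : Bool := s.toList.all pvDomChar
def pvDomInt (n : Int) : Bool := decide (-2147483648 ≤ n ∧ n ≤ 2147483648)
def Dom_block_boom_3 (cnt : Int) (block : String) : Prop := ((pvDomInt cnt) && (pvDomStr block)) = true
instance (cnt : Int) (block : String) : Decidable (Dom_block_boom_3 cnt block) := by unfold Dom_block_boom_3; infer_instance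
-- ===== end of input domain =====

-- B replaces A's per-character stack (one entry per character, plus a dummy sentinel) by a
-- run-length-encoded stack of whole (char, length) runs; equivalence is proved for cnt ≥ 1
-- (for cnt ≤ 0 the Python A always raises IndexError, see Raises_ below).

-- ===== PORT A =====
-- A's stack entries are Python pairs (char, count); the dummy bottom entry is ('', 0) in
-- Python — modelled here as (none, 0), a real character c as (some c, count).
-- Lists hold the TOP of the Python stack first (stack[-1] = head).

-- stack[-1], with the dummy as default (Python would raise on an empty stack; inside
-- Pre_ the stack is never empty at any read — the default is only a totality guard).
def pyTopA (st : List (Option Char × Int)) : Option Char × Int := st.headD (none, 0)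

-- `top = stack[-1][0]; while top == stack[-1][0]: stack.pop()`
def popRunA (t : Option Char) : List (Option Char × Int) → List (Option Char × Int)
  | [] => []
  | (c, n) :: rest => if c = t then popRunA t rest else (c, n) :: rest

-- the first `if` of A's loop body (the "boom" pop)
def boomA (cnt : Int) (ch : Char) (st : List (Option Char × Int)) : List (Option Char × Int) :=
  if (pyTopA st).1 ≠ some ch ∧ (pyTopA st).2 ≥ cnt then popRunA (pyTopA st).1 st else st

-- the second `if` of A's loop body (push with running count)
def pushA (ch : Char) (st1 : List (Option Char × Int)) : List (Option Char × Int) :=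
  if (pyTopA st1).1 = some ch then (some ch, (pyTopA st1).2 + 1) :: st1 else (some ch, 1) :: st1

def stepA (cnt : Int) (st : List (Option Char × Int)) (ch : Char) : List (Option Char × Int) :=
  pushA ch (boomA cnt ch st)

def block_boom_3 (cnt : Int) (block : String) : String :=
  let st := (block.toList ++ ['z']).foldl (stepA cnt) [(none, 0)]
  let st2 := st.tail     -- stack.pop()
  if st2.length > 1 then
    -- block = ''; for char, num in stack: block += char   (bottom to top = reverse)
    st2.reverse.foldl (fun acc e => acc ++ (match e.1 with | none => "" | some c => String.ofList [c])) ""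
  else "CLEAR!"

-- ===== PORT B =====
-- runs are built by Source B's loop with the accumulator kept last-run-first, then reversed
def rleStepB (acc : List (Char × Int)) (ch : Char) : List (Char × Int) :=
  match acc with
  | (c, n) :: rest => if c = ch then (c, n + 1) :: rest else (ch, 1) :: (c, n) :: rest
  | [] => [(ch, 1)]

def rleB (s : List Char) : List (Char × Int) := (s.foldl rleStepB []).reverse

-- Source B's `if stack and stack[-1][0] != ch and stack[-1][1] >= cnt: stack.pop()`
def popB (cnt : Int) (ch : Char) (st : List (Char × Int)) : List (Char × Int) :=
  match st with
  | (c, n) :: rest => if c ≠ ch ∧ n ≥ cnt then rest else (c, n) :: rest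
  | [] => []

-- Source B's merge-or-push
def pushB (r : Char × Int) (st1 : List (Char × Int)) : List (Char × Int) :=
  match st1 with
  | (c, n) :: rest => if c = r.1 then (c, n + r.2) :: rest else r :: (c, n) :: rest
  | [] => [r]

def stepB (cnt : Int) (st : List (Char × Int)) (r : Char × Int) : List (Char × Int) :=
  pushB r (popB cnt r.1 st)

-- Source B after its second loop: undo the dummy 'z', then join or 'CLEAR!'
def finishB (st : List (Char × Int)) : String :=
  match st with
  | [] => "CLEAR!"   -- unreachable (Source B reads stack[-1]; the stack is provably nonempty here)
  | (c, n) :: rest =>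
    let st' := if n = 1 then rest else (c, n - 1) :: rest
    if st' = [] then "CLEAR!"
    else st'.reverse.foldl (fun acc e => acc ++ String.ofList (List.replicate e.2.toNat e.1)) ""

def block_boom_3_alt (cnt : Int) (block : String) : String :=
  finishB ((rleB (block.toList ++ ['z'])).foldl (stepB cnt) [])

-- ===== PRECONDITION & SPEC =====
-- For cnt ≤ 0 A pops its dummy sentinel on the very first character and raises IndexError,
-- so exactly cnt ≥ 1 is the domain on which A returns.
def Pre_block_boom_3 (cnt : Int) (block : String) : Prop := 1 ≤ cnt
instance (cnt : Int) (block : String) : Decidable (Pre_block_boom_3 cnt block) := by unfold Pre_block_boom_3; infer_instance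
def pvWitness_block_boom_3 : Int × String := (2, "aabbbaa")

def Spec_block_boom_3 (cnt : Int) (block : String) (out : String) : Prop := out = block_boom_3_alt cnt block
instance (cnt : Int) (block : String) (out : String) : Decidable (Spec_block_boom_3 cnt block out) := by unfold Spec_block_boom_3; infer_instance

-- ===== CLAIM (what is proved, stated in full; the proofs are below) =====
def Claim_equal_block_boom_3 : Prop := ∀ (cnt : Int) (block : String), Dom_block_boom_3 cnt block → Pre_block_boom_3 cnt block → Spec_block_boom_3 cnt block (block_boom_3 cnt block)

-- ===== LEMMAS AND PROOFS =====

-- entries c k = the k A-stack entries of one B-run of char c and length k, top first: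
-- (c,k), (c,k-1), …, (c,1)
def entries (c : Char) : Nat → List (Option Char × Int)
  | 0 => []
  | k + 1 => (some c, (k : Int) + 1) :: entries c k

-- expansion of a B stack into the corresponding A stack (dummy at the bottom)
def expandS : List (Char × Int) → List (Option Char × Int)
  | [] => [(none, 0)]
  | (c, n) :: rest => entries c n.toNat ++ expandS rest

-- invariant of the B stack: positive run lengths, adjacent runs of distinct chars
def GoodS : List (Char × Int) → Prop
  | [] => True
  | [r] => 1 ≤ r.2
  | r :: s :: rest => 1 ≤ r.2 ∧ r.1 ≠ s.1 ∧ GoodS (s :: rest)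

theorem goodS_nil : GoodS [] := trivial

theorem goodS_tail (r : Char × Int) (bs : List (Char × Int)) (h : GoodS (r :: bs)) : GoodS bs := by
  cases bs with
  | nil => trivial
  | cons s rest => exact h.2.2

theorem goodS_head (r : Char × Int) (bs : List (Char × Int)) (h : GoodS (r :: bs)) : 1 ≤ r.2 := by
  cases bs with
  | nil => exact h
  | cons s rest => exact h.1

theorem pyTopA_entries_append (c : Char) (k : Nat) (hk : 1 ≤ k) (l : List (Option Char × Int)) :
    pyTopA (entries c k ++ l) = (some c, (k : Int)) := by
  cases k with
  | zero => omega
  | succ k => simp [pyTopA, entries]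

theorem pyTopA_expandS (bs : List (Char × Int)) (hg : GoodS bs) :
    pyTopA (expandS bs) = match bs with | [] => (none, 0) | (c, n) :: _ => (some c, n) := by
  cases bs with
  | nil => simp [pyTopA, expandS]
  | cons r rest =>
    obtain ⟨c, n⟩ := r
    have hn : 1 ≤ n := goodS_head _ _ hg
    have h1 : 1 ≤ n.toNat := by omega
    have hc : ((n.toNat : Int)) = n := by omega
    show pyTopA (entries c n.toNat ++ expandS rest) = (some c, n)
    rw [pyTopA_entries_append c n.toNat h1, hc]

theorem popRunA_entries (c : Char) (k : Nat) (l : List (Option Char × Int))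
    (hl : (pyTopA l).1 ≠ some c) (hne : l ≠ []) :
    popRunA (some c) (entries c k ++ l) = l := by
  induction k with
  | zero =>
    cases l with
    | nil => exact absurd rfl hne
    | cons e rest =>
      obtain ⟨oc, m⟩ := e
      simp [pyTopA] at hl
      simp [entries, popRunA, hl]
  | succ k ih => simp [entries, popRunA, ih]

theorem expandS_ne_nil (bs : List (Char × Int)) : expandS bs ≠ [] := by
  cases bs with
  | nil => simp [expandS]
  | cons r rest =>
    obtain ⟨c, n⟩ := r
    cases h : n.toNat with
    | zero => simp [expandS, h, entries]; exact fun hh => (expandS_ne_nil rest) (by simpa using hh)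
    | succ k => simp [expandS, h, entries]

-- A's merge phase: m further chars c on a stack whose top run is (c, j)
theorem mergeA (cnt : Int) (c : Char) (m : Nat) :
    ∀ (j : Nat) (l : List (Option Char × Int)), 1 ≤ j →
    List.foldl (stepA cnt) (entries c j ++ l) (List.replicate m c) = entries c (j + m) ++ l := by
  induction m with
  | zero => intro j l _; simp
  | succ m ih =>
    intro j l hj
    rw [List.replicate_succ, List.foldl_cons]
    have htop := pyTopA_entries_append c j hj l
    have hstep : stepA cnt (entries c j ++ l) c = entries c (j + 1) ++ l := by
      unfold stepA boomA pushA
      simp [htop, entries]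
    rw [hstep, ih (j + 1) l (by omega)]
    ring_nf


theorem goodS_ne (r s : Char × Int) (rest : List (Char × Int)) (h : GoodS (r :: s :: rest)) :
    r.1 ≠ s.1 := h.2.1

theorem goodS_set_head (c : Char) (p q : Int) (r : List (Char × Int))
    (h : GoodS ((c, p) :: r)) (hq : 1 ≤ q) : GoodS ((c, q) :: r) := by
  cases r with
  | nil => exact hq
  | cons s rest => exact ⟨hq, h.2.1, h.2.2⟩

theorem stepA_top_eq (cnt : Int) (st : List (Option Char × Int)) (ch : Char) (v : Int)
    (h : pyTopA st = (some ch, v)) : stepA cnt st ch = (some ch, v + 1) :: st := by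
  unfold stepA boomA pushA
  simp [h]

-- one run processed by A char-by-char equals one run processed by B
theorem runStep (cnt : Int) (hcnt : 1 ≤ cnt) (c : Char) (n : Int) (hn : 1 ≤ n)
    (bs : List (Char × Int)) (hg : GoodS bs) :
    List.foldl (stepA cnt) (expandS bs) (List.replicate n.toNat c) = expandS (stepB cnt bs (c, n)) ∧
    GoodS (stepB cnt bs (c, n)) ∧
    (∃ m rest, stepB cnt bs (c, n) = (c, m) :: rest) := by
  obtain ⟨j0, rest0, hj0, hA1, hB, hGB⟩ :
      ∃ (j0 : Nat) (rest0 : List (Char × Int)), 1 ≤ j0 ∧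
        stepA cnt (expandS bs) c = entries c j0 ++ expandS rest0 ∧
        stepB cnt bs (c, n) = (c, (j0 : Int) + n - 1) :: rest0 ∧
        GoodS ((c, (j0 : Int) + n - 1) :: rest0) := by
    have hcnt0 : ¬ ((0 : Int) ≥ cnt) := by omega
    cases bs with
    | nil =>
      refine ⟨1, [], le_refl 1, ?_, ?_, ?_⟩
      · unfold stepA boomA pushA
        simp [expandS, pyTopA, hcnt0, entries]
      · simp [stepB, popB, pushB]
      · show (1 : Int) ≤ 1 + n - 1
        omega
    | cons r rest =>
      obtain ⟨d, m⟩ := r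
      have hm : 1 ≤ m := goodS_head _ _ hg
      have hgr : GoodS rest := goodS_tail _ _ hg
      have htop : pyTopA (expandS ((d, m) :: rest)) = (some d, m) := pyTopA_expandS _ hg
      have hmc : ((m.toNat : Int)) = m := by omega
      by_cases hdc : d = c
      · subst hdc
        refine ⟨m.toNat + 1, rest, by omega, ?_, ?_, ?_⟩
        · rw [stepA_top_eq cnt _ d m htop]
          show (some d, m + 1) :: expandS ((d, m) :: rest)
              = entries d (m.toNat + 1) ++ expandS rest
          simp [expandS, entries, hmc]
        · simp only [stepB, popB, pushB]
          simp
          omega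
        · apply goodS_set_head d m _ rest hg
          omega
      · have hsome : some d ≠ some c := by simpa using hdc
        by_cases hge : m ≥ cnt
        · -- boom: the top run is popped
          have hpop : boomA cnt c (expandS ((d, m) :: rest)) = expandS rest := by
            unfold boomA
            rw [htop]
            simp only [hsome, hge, ne_eq, not_false_iff, and_true, if_pos]
            have hne : (pyTopA (expandS rest)).1 ≠ some d := by
              rw [pyTopA_expandS rest hgr]
              cases rest with
              | nil => simp
              | cons s r2 =>
                obtain ⟨e, p⟩ := s
                simpa using (Ne.symm (goodS_ne (d, m) (e, p) r2 hg))
            show popRunA (some d) (entries d m.toNat ++ expandS rest) = expandS rest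
            exact popRunA_entries d m.toNat _ hne (expandS_ne_nil rest)
          cases rest with
          | nil =>
            refine ⟨1, [], le_refl 1, ?_, ?_, ?_⟩
            · unfold stepA
              rw [hpop]
              unfold pushA
              simp [expandS, pyTopA, entries]
            · simp [stepB, popB, pushB, hdc, hge]
            · show (1 : Int) ≤ 1 + n - 1
              omega
          | cons sr r2 =>
            obtain ⟨e, p⟩ := sr
            have hp : 1 ≤ p := goodS_head _ _ hgr
            have hpc : ((p.toNat : Int)) = p := by omega
            have htop2 : pyTopA (expandS ((e, p) :: r2)) = (some e, p) := pyTopA_expandS _ hgr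
            by_cases hec : e = c
            · subst hec
              refine ⟨p.toNat + 1, r2, by omega, ?_, ?_, ?_⟩
              · unfold stepA
                rw [hpop]
                unfold pushA
                rw [htop2]
                simp [expandS, entries, hpc]
              · simp only [stepB, popB, pushB]
                simp [hdc, hge]
                omega
              · apply goodS_set_head e p _ r2 hgr
                omega
            · have hsome2 : some e ≠ some c := by simpa using hec
              refine ⟨1, (e, p) :: r2, le_refl 1, ?_, ?_, ?_⟩
              · unfold stepA
                rw [hpop]
                unfold pushA
                rw [htop2]
                simp [hsome2, entries]
              · simp [stepB, popB, pushB, hdc, hge, hec]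
              · refine ⟨by omega, by simpa using Ne.symm hec, hgr⟩
        · -- no boom, push a new run of c on top
          have hpop : boomA cnt c (expandS ((d, m) :: rest)) = expandS ((d, m) :: rest) := by
            unfold boomA
            rw [htop]
            simp [hge]
          refine ⟨1, (d, m) :: rest, le_refl 1, ?_, ?_, ?_⟩
          · unfold stepA
            rw [hpop]
            unfold pushA
            rw [htop]
            simp [hsome, entries]
          · simp [stepB, popB, pushB, hdc, hge]
          · refine ⟨by omega, by simpa using Ne.symm hdc, hg⟩
  obtain ⟨k, hk⟩ : ∃ k, n.toNat = k + 1 := ⟨n.toNat - 1, by omega⟩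
  refine ⟨?_, by rw [hB]; exact hGB, ⟨_, _, hB⟩⟩
  rw [hk, List.replicate_succ, List.foldl_cons, hA1, mergeA cnt c k j0 _ hj0, hB]
  have hcast : ((j0 : Int) + n - 1).toNat = j0 + k := by omega
  simp [expandS, hcast]

theorem loopAB (cnt : Int) (hcnt : 1 ≤ cnt) (runs : List (Char × Int)) :
    ∀ (bs : List (Char × Int)), GoodS bs → (∀ r ∈ runs, 1 ≤ r.2) →
    List.foldl (stepA cnt) (expandS bs) (runs.flatMap (fun r => List.replicate r.2.toNat r.1)) =
      expandS (List.foldl (stepB cnt) bs runs) ∧ GoodS (List.foldl (stepB cnt) bs runs) := by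
  induction runs with
  | nil => intro bs hg _; exact ⟨rfl, hg⟩
  | cons r rest ih =>
    intro bs hg hpos
    obtain ⟨c, n⟩ := r
    have hn : 1 ≤ n := hpos (c, n) (by simp)
    obtain ⟨h1, h2, _⟩ := runStep cnt hcnt c n hn bs hg
    rw [List.flatMap_cons, List.foldl_append, h1]
    exact ih (stepB cnt bs (c, n)) h2 (fun x hx => hpos x (by simp [hx]))

-- rleB spec: the runs flatten back to the string and have positive lengths
theorem rleStepB_pos (acc : List (Char × Int)) (ch : Char) (hacc : ∀ r ∈ acc, 1 ≤ r.2) :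
    ∀ r ∈ rleStepB acc ch, 1 ≤ r.2 := by
  cases acc with
  | nil => simp [rleStepB]
  | cons a rest =>
    obtain ⟨cc, nn⟩ := a
    have hnn : 1 ≤ nn := hacc (cc, nn) (by simp)
    by_cases h : cc = ch
    · subst h
      simp only [rleStepB, reduceIte]
      intro r hr
      rcases List.mem_cons.mp hr with h1 | h2
      · subst h1; simp; omega
      · exact hacc r (by simp [h2])
    · simp only [rleStepB, if_neg h]
      intro r hr
      rcases List.mem_cons.mp hr with h1 | h2
      · subst h1; simp
      · exact hacc r h2

theorem rleStepB_flat (acc : List (Char × Int)) (ch : Char) (hacc : ∀ r ∈ acc, 1 ≤ r.2) :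
    ((rleStepB acc ch).reverse.flatMap fun r => List.replicate r.2.toNat r.1)
      = (acc.reverse.flatMap fun r => List.replicate r.2.toNat r.1) ++ [ch] := by
  cases acc with
  | nil => simp [rleStepB]
  | cons a rest =>
    obtain ⟨cc, nn⟩ := a
    have hnn : 1 ≤ nn := hacc (cc, nn) (by simp)
    by_cases h : cc = ch
    · subst h
      simp only [rleStepB, reduceIte, List.reverse_cons, List.flatMap_append]
      have : (nn + 1).toNat = nn.toNat + 1 := by omega
      simp [this, List.replicate_succ']
    · simp [rleStepB, h, List.replicate_succ']

theorem rle_inv (s : List Char) :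
    ∀ acc, (∀ r ∈ acc, 1 ≤ r.2) →
    (((s.foldl rleStepB acc).reverse.flatMap fun r => List.replicate r.2.toNat r.1)
        = (acc.reverse.flatMap fun r => List.replicate r.2.toNat r.1) ++ s) ∧
    (∀ r ∈ s.foldl rleStepB acc, 1 ≤ r.2) := by
  induction s with
  | nil => intro acc hacc; simpa using hacc
  | cons ch s ih =>
    intro acc hacc
    rw [List.foldl_cons]
    obtain ⟨h1, h2⟩ := ih (rleStepB acc ch) (rleStepB_pos acc ch hacc)
    refine ⟨?_, h2⟩
    rw [h1, rleStepB_flat acc ch hacc, List.append_assoc]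
    rfl

theorem rleB_spec (s : List Char) :
    (rleB s).flatMap (fun r => List.replicate r.2.toNat r.1) = s ∧ ∀ r ∈ rleB s, 1 ≤ r.2 := by
  obtain ⟨h1, h2⟩ := rle_inv s [] (by simp)
  constructor
  · simpa [rleB] using h1
  · intro r hr
    exact h2 r (by simpa [rleB] using hr)

theorem entries_filterMap (c : Char) (k : Nat) :
    (entries c k).filterMap (fun e => e.1) = List.replicate k c := by
  induction k with
  | zero => simp [entries]
  | succ k ih => simp [entries, List.replicate_succ, ih]

theorem entries_length (c : Char) (k : Nat) : (entries c k).length = k := by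
  induction k with
  | zero => simp [entries]
  | succ k ih => simp [entries, ih]

theorem filterMap_expandS (bs : List (Char × Int)) :
    (expandS bs).filterMap (fun e => e.1) = bs.flatMap (fun r => List.replicate r.2.toNat r.1) := by
  induction bs with
  | nil => simp [expandS]
  | cons r rest ih =>
    obtain ⟨c, n⟩ := r
    simp [expandS, entries_filterMap, ih]

-- A's output fold = the string of the stack's chars, in list order
theorem foldA_out (l : List (Option Char × Int)) :
    ∀ acc : String,
    l.foldl (fun acc e => acc ++ (match e.1 with | none => "" | some c => String.ofList [c])) acc
      = acc ++ String.ofList (l.filterMap (fun e => e.1)) := by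
  induction l with
  | nil => intro acc; simp
  | cons e rest ih =>
    intro acc
    obtain ⟨oc, m⟩ := e
    cases oc with
    | none => simpa using ih acc
    | some c =>
      simp only [List.foldl_cons, ih, List.filterMap_cons]
      rw [String.append_assoc, ← String.ofList_append]
      rfl

theorem foldB_out (bs : List (Char × Int)) :
    ∀ acc : String,
    bs.foldl (fun acc e => acc ++ String.ofList (List.replicate e.2.toNat e.1)) acc
      = acc ++ String.ofList (bs.flatMap (fun r => List.replicate r.2.toNat r.1)) := by
  induction bs with
  | nil => intro acc; simp
  | cons r rest ih =>
    intro acc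
    simp only [List.foldl_cons, ih, List.flatMap_cons]
    rw [String.append_assoc, ← String.ofList_append]

theorem length_expandS_pos (bs : List (Char × Int)) (hg : GoodS bs) :
    1 < (expandS bs).length ↔ bs ≠ [] := by
  cases bs with
  | nil => simp [expandS]
  | cons r rest =>
    obtain ⟨c, n⟩ := r
    have hn : 1 ≤ n := goodS_head _ _ hg
    have hrest : 0 < (expandS rest).length := List.length_pos_of_ne_nil (expandS_ne_nil rest)
    simp only [expandS, List.length_append, entries_length]
    constructor
    · intro _; simp
    · intro _; omega

theorem stepB_ne_nil (cnt : Int) (st : List (Char × Int)) (r : Char × Int) :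
    stepB cnt st r ≠ [] := by
  unfold stepB pushB
  cases h : popB cnt r.1 st with
  | nil => simp
  | cons a rest =>
    obtain ⟨cc, nn⟩ := a
    by_cases hc : cc = r.1 <;> simp [hc]

theorem foldl_stepB_ne_nil (cnt : Int) (runs : List (Char × Int)) (h : runs ≠ []) :
    ∀ st, List.foldl (stepB cnt) st runs ≠ [] := by
  induction runs with
  | nil => exact absurd rfl h
  | cons r rest ih =>
    intro st
    cases hr : rest with
    | nil => simpa using stepB_ne_nil cnt st r
    | cons a b =>
      rw [List.foldl_cons]
      exact (hr ▸ ih (by simp [hr])) (stepB cnt st r)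

theorem main_equal (cnt : Int) (block : String) (hcnt : 1 ≤ cnt) :
    block_boom_3 cnt block = block_boom_3_alt cnt block := by
  simp only [block_boom_3, block_boom_3_alt]
  obtain ⟨hflat, hpos⟩ := rleB_spec (block.toList ++ ['z'])
  obtain ⟨hAB, hgood⟩ := loopAB cnt hcnt (rleB (block.toList ++ ['z'])) [] goodS_nil hpos
  rw [hflat] at hAB
  have hruns : rleB (block.toList ++ ['z']) ≠ [] := by
    intro h
    rw [h] at hflat
    simp at hflat
  cases hbs : List.foldl (stepB cnt) [] (rleB (block.toList ++ ['z'])) with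
  | nil => exact absurd hbs (foldl_stepB_ne_nil cnt _ hruns [])
  | cons rf restf =>
    obtain ⟨cf, nf⟩ := rf
    rw [hbs] at hAB hgood
    have hnf : 1 ≤ nf := goodS_head _ _ hgood
    have hA : (block.toList ++ ['z']).foldl (stepA cnt) [(none, 0)] = expandS ((cf, nf) :: restf) := by
      rw [← hAB]; rfl
    rw [hA]
    simp only [finishB]
    -- the popped A-stack equals the expansion of B's decremented stack
    have htail : (expandS ((cf, nf) :: restf)).tail
        = expandS (if nf = 1 then restf else (cf, nf - 1) :: restf) := by
      by_cases h1 : nf = 1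
      · subst h1
        simp [expandS, entries]
      · have h2 : nf.toNat = (nf - 1).toNat + 1 := by omega
        simp only [expandS, if_neg h1, h2, entries]
        simp
    rw [htail]
    have hgood' : GoodS (if nf = 1 then restf else (cf, nf - 1) :: restf) := by
      by_cases h1 : nf = 1
      · simpa [h1] using goodS_tail _ _ hgood
      · rw [if_neg h1]
        exact goodS_set_head cf nf (nf - 1) restf hgood (by omega)
    by_cases hnil : (if nf = 1 then restf else (cf, nf - 1) :: restf) = []
    · rw [hnil]
      have : ¬ (1 < (expandS ([] : List (Char × Int))).length) := by simp [expandS]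
      rw [if_neg this, if_pos rfl]
    · have hlen : 1 < (expandS (if nf = 1 then restf else (cf, nf - 1) :: restf)).length :=
        (length_expandS_pos _ hgood').mpr hnil
      rw [if_pos hlen, if_neg hnil]
      rw [foldA_out, foldB_out]
      rw [List.filterMap_reverse, filterMap_expandS]
      have : (if nf = 1 then restf else (cf, nf - 1) :: restf).reverse.flatMap
            (fun r => List.replicate r.2.toNat r.1)
          = ((if nf = 1 then restf else (cf, nf - 1) :: restf).flatMap
            (fun r => List.replicate r.2.toNat r.1)).reverse := by
        rw [List.flatMap_reverse]
        simp [Function.comp_def, List.reverse_replicate]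
      rw [this]

-- ===== VERDICT (by name: the statement is the Claim_ definition above) =====
theorem block_boom_3_spec : Claim_equal_block_boom_3 := by
  intro cnt block _ hpre
  exact main_equal cnt block hpre
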